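-- pv_equiv track=rewrite | github.com/platelet-code/Code_Conduit_Vault | 08_QuantumScaffold/02_FenwickTree/fenwick_001.py | maxPathLength
-- ===== SOURCE A (Python) =====
-- from typing import List
--
-- class FenwickTree:
--     def __init__(self, size):
--         self.tree = [0] * (size + 2)
--
--     def update(self, idx, val):
--         while idx < len(self.tree):
--             self.tree[idx] = max(self.tree[idx], val)
--             idx += idx & -idx
--
--     def query(self, idx):
--         res = 0
--         while idx > 0:
--             res = max(res, self.tree[idx])
--             idx -= idx & -idx
--         return res
--
-- def maxPathLength(nums: List[List[int]], k: int) -> int: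
--     kx, ky = nums[k]
--     nums.sort(key=lambda p: (p[0], -p[1]))
--     nums_rev = [[-x, -y] for x, y in nums]
--     nums_rev.sort(key=lambda p: (p[0], -p[1]))
--
--     def getLen(points, target_x, target_y):
--         ys = [y for x, y in points]
--         sorted_ys = sorted(set(ys))
--         y_idx = {y: i+1 for i, y in enumerate(sorted_ys)}
--         bit = FenwickTree(len(sorted_ys))
--         for x, y in points:
--             idx = y_idx[y]
--             cur_len = bit.query(idx - 1) + 1
--             if x == target_x and y == target_y:
--                 return cur_len
--             bit.update(idx, cur_len)
--         return 0
--
--     len_forward = getLen(nums, kx, ky)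
--     len_backward = getLen(nums_rev, -kx, -ky)
--     return len_forward + len_backward - 1
-- ===== SOURCE B (Python) =====
-- from typing import List
--
-- def maxPathLength(nums: List[List[int]], k: int) -> int:
--     kx, ky = nums[k]
--     nums.sort(key=lambda p: (p[0], -p[1]))
--     nums_rev = [[-x, -y] for x, y in nums]
--     nums_rev.sort(key=lambda p: (p[0], -p[1]))
--
--     def getLen(points, target_x, target_y):
--         best = []  # (y, length of best increasing chain ending at that earlier point)
--         for x, y in points:
--             cur = 1 + max((l for py, l in best if py < y), default=0)
--             if x == target_x and y == target_y:
--                 return cur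
--             best.append((y, cur))
--         return 0
--
--     return getLen(nums, kx, ky) + getLen(nums_rev, -kx, -ky) - 1
-- ===== Notes on version B (the rewrite author's own statement) =====
-- stated objective: simpler
-- what changed: getLen's coordinate compression + Fenwick max-tree (with its bit-trick update/query loops) is replaced by a direct scan that keeps a plain list of (y, chain-length) for the points already seen and takes the max over entries with smaller y.
import Mathlib
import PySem

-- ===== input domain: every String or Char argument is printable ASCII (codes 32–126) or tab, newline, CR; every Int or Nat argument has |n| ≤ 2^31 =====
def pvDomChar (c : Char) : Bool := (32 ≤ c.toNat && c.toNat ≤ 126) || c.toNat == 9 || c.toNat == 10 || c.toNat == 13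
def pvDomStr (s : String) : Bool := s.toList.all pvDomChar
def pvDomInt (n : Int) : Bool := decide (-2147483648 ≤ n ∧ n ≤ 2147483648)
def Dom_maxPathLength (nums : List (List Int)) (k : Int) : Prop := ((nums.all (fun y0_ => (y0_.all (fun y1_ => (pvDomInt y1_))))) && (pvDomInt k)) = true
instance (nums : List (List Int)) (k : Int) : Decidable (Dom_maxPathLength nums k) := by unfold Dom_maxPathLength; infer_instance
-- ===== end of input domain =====

-- B replaces A's coordinate compression + Fenwick max-tree inside getLen by a direct
-- quadratic scan over the already-computed chain lengths (objective: simpler).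
-- NOTE: the Python A sorts `nums` in place; the equivalence proved here is about the
-- RETURN value only (Python B performs the same in-place sort).

-- ===== PORT A =====
-- FenwickTree.update: while idx < len(tree): tree[idx] = max(tree[idx], val); idx += idx & -idx
-- (fuel = tree.length bounds the steps; inside the program idx ≥ 1 grows by ≥ 1 per step, so fuel never runs out)
def fenUpdate (tree : List Int) (idx val : Int) (fuel : Nat) : List Int :=
  match fuel with
  | 0 => tree
  | fuel + 1 =>
      if idx < (tree.length : Int) then
        fenUpdate (PySem.List.pySetD tree idx (max (PySem.List.pyGetD tree idx 0) val))
          (idx + PySem.Int.band idx (-idx)) val fuel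
      else tree

-- FenwickTree.query: res = 0; while idx > 0: res = max(res, tree[idx]); idx -= idx & -idx
def fenQuery (tree : List Int) (idx res : Int) (fuel : Nat) : Int :=
  match fuel with
  | 0 => res
  | fuel + 1 =>
      if 0 < idx then
        fenQuery tree (idx - PySem.Int.band idx (-idx)) (max res (PySem.List.pyGetD tree idx 0)) fuel
      else res

-- the 'for x, y in points' loop of A's getLen (rows have length 2 under Pre_)
def getLenGoA (yIdx : PySem.Dict Int Int) (tx ty : Int) :
    List (List Int) → List Int → Int
  | [], _ => 0
  | p :: rest, tree =>
      let x := PySem.List.pyGetD p 0 0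
      let y := PySem.List.pyGetD p 1 0
      let idx := yIdx.getD y 0
      let cur := fenQuery tree (idx - 1) 0 tree.length + 1
      if x = tx ∧ y = ty then cur
      else getLenGoA yIdx tx ty rest (fenUpdate tree idx cur tree.length)

def getLenA (points : List (List Int)) (tx ty : Int) : Int :=
  let ys := points.map (fun p => PySem.List.pyGetD p 1 0)
  let sortedYs := PySem.List.sorted (PySem.Set.ofList ys) (fun y => y)
  let yIdx := (PySem.List.enumerate sortedYs).foldl
      (fun d e => d.insert e.2 (e.1 + 1)) PySem.Dict.empty
  getLenGoA yIdx tx ty points (List.replicate (sortedYs.length + 2) 0)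

def maxPathLength (nums : List (List Int)) (k : Int) : Int :=
  match PySem.List.pyGet? nums k with
  | none => 0  -- IndexError on nums[k]; excluded by Pre_
  | some pk =>
      let kx := PySem.List.pyGetD pk 0 0
      let ky := PySem.List.pyGetD pk 1 0
      let s := PySem.List.sorted2 nums
        (fun p => PySem.List.pyGetD p 0 0) (fun p => -(PySem.List.pyGetD p 1 0))
      let rev := s.map (fun p => [-(PySem.List.pyGetD p 0 0), -(PySem.List.pyGetD p 1 0)])
      let revS := PySem.List.sorted2 rev
        (fun p => PySem.List.pyGetD p 0 0) (fun p => -(PySem.List.pyGetD p 1 0))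
      getLenA s kx ky + getLenA revS (-kx) (-ky) - 1

-- ===== PORT B =====
-- the 'for x, y in points' loop of B's getLen: best holds (y, chain length) of earlier points
def getLenGoB (tx ty : Int) : List (List Int) → List (Int × Int) → Int
  | [], _ => 0
  | p :: rest, best =>
      let x := PySem.List.pyGetD p 0 0
      let y := PySem.List.pyGetD p 1 0
      let cur := 1 + best.foldl (fun m e => if e.1 < y then max m e.2 else m) 0
      if x = tx ∧ y = ty then cur
      else getLenGoB tx ty rest (best ++ [(y, cur)])

def getLenB (points : List (List Int)) (tx ty : Int) : Int :=
  getLenGoB tx ty points []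

def maxPathLength_alt (nums : List (List Int)) (k : Int) : Int :=
  match PySem.List.pyGet? nums k with
  | none => 0  -- IndexError on nums[k]; excluded by Pre_
  | some pk =>
      let kx := PySem.List.pyGetD pk 0 0
      let ky := PySem.List.pyGetD pk 1 0
      let s := PySem.List.sorted2 nums
        (fun p => PySem.List.pyGetD p 0 0) (fun p => -(PySem.List.pyGetD p 1 0))
      let rev := s.map (fun p => [-(PySem.List.pyGetD p 0 0), -(PySem.List.pyGetD p 1 0)])
      let revS := PySem.List.sorted2 rev
        (fun p => PySem.List.pyGetD p 0 0) (fun p => -(PySem.List.pyGetD p 1 0))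
      getLenB s kx ky + getLenB revS (-kx) (-ky) - 1

-- ===== PRECONDITION & SPEC =====
-- Pre_ is exactly where the Python A returns: nums[k] must not raise IndexError and every
-- row must unpack as 'x, y' (length 2), else A raises ValueError.
def Pre_maxPathLength (nums : List (List Int)) (k : Int) : Prop :=
  PySem.Raise.InRange nums.length k ∧ ∀ p ∈ nums, p.length = 2
instance (nums : List (List Int)) (k : Int) : Decidable (Pre_maxPathLength nums k) := by
  unfold Pre_maxPathLength; infer_instance

def pvWitness_maxPathLength : List (List Int) × Int := ([[0, 0], [1, 1], [0, 3]], 1)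

def Spec_maxPathLength (nums : List (List Int)) (k : Int) (out : Int) : Prop :=
  out = maxPathLength_alt nums k
instance (nums : List (List Int)) (k : Int) (out : Int) : Decidable (Spec_maxPathLength nums k out) := by
  unfold Spec_maxPathLength; infer_instance

-- ===== CLAIM (what is proved, stated in full; the proofs are below) =====
def Claim_equal_maxPathLength : Prop := ∀ (nums : List (List Int)) (k : Int),
  Dom_maxPathLength nums k → Pre_maxPathLength nums k →
    Spec_maxPathLength nums k (maxPathLength nums k)

-- ===== LEMMAS AND PROOFS =====

-- `idx & -idx` arithmetic, on Nat: aN m = m with its lowest set bit cleared, lbN m = that bit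
def aN (m : Nat) : Nat := m &&& (m - 1)
def lbN (m : Nat) : Nat := m - aN m

theorem aN_le (m : Nat) : aN m ≤ m := Nat.and_le_left

theorem and_two_mul_sub_one (m : Nat) (h : 0 < m) :
    (2*m) &&& (2*m-1) = 2*(m &&& (m-1)) := by
  apply Nat.eq_of_testBit_eq
  intro i
  have e : 2*m-1 = 2*(m-1)+1 := by omega
  have d1 : (2*m)/2 = m := by omega
  have d2 : (2*(m-1)+1)/2 = m-1 := by omega
  have d3 : (2*(m &&& (m-1)))/2 = m &&& (m-1) := by omega
  cases i with
  | zero => simp [Nat.testBit_zero]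
  | succ i =>
      rw [e, Nat.testBit_and, Nat.testBit_succ, Nat.testBit_succ, Nat.testBit_succ, d1, d2, d3,
        Nat.testBit_and]

theorem and_odd_pred (m : Nat) : (2*m+1) &&& (2*m) = 2*m := by
  apply Nat.eq_of_testBit_eq
  intro i
  have d1 : (2*m+1)/2 = m := by omega
  have d2 : (2*m)/2 = m := by omega
  cases i with
  | zero => simp [Nat.testBit_zero]
  | succ i =>
      rw [Nat.testBit_and, Nat.testBit_succ, Nat.testBit_succ, d1, d2, Bool.and_self]

theorem aN_odd (m : Nat) : aN (2*m+1) = 2*m := by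
  have h : 2*m+1-1 = 2*m := by omega
  simp only [aN, h, and_odd_pred]

theorem aN_even (m : Nat) (h : 0 < m) : aN (2*m) = 2 * aN m := by
  simp only [aN, and_two_mul_sub_one m h]

theorem aN_lt (m : Nat) (h : 0 < m) : aN m < m := by
  induction m using Nat.strong_induction_on with
  | _ m ih =>
    rcases Nat.even_or_odd m with ⟨q, hq⟩ | ⟨q, hq⟩
    · have hm : m = 2*q := by omega
      have hq0 : 0 < q := by omega
      have := ih q (by omega) hq0
      rw [hm, aN_even q hq0]; omega
    · have hm : m = 2*q+1 := by omega
      rw [hm, aN_odd]; omega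

theorem lbN_pos (m : Nat) (h : 0 < m) : 0 < lbN m := by
  have := aN_lt m h; unfold lbN; omega

theorem lbN_odd (m : Nat) : lbN (2*m+1) = 1 := by
  unfold lbN; rw [aN_odd]; omega

theorem lbN_even (m : Nat) (h : 0 < m) : lbN (2*m) = 2 * lbN m := by
  have := aN_le m
  unfold lbN; rw [aN_even m h]; omega

-- any j above i whose cleared form drops below i lies at or beyond i + lbN i
theorem step_ge (j : Nat) : ∀ i : Nat, 0 < i → i < j → aN j < i → i + lbN i ≤ j := by
  induction j using Nat.strong_induction_on with
  | _ j ih =>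
    intro i hi hij haj
    rcases Nat.even_or_odd i with ⟨a, ha⟩ | ⟨a, ha⟩
    · have hieq : i = 2*a := by omega
      have ha0 : 0 < a := by omega
      rcases Nat.even_or_odd j with ⟨b, hb⟩ | ⟨b, hb⟩
      · have hjeq : j = 2*b := by omega
        have hb0 : 0 < b := by omega
        have haj' : aN b < a := by
          have := aN_even b hb0
          rw [hjeq, this] at haj; omega
        have := ih b (by omega) a ha0 (by omega) haj'
        rw [hieq, hjeq, lbN_even a ha0]; omega
      · have hjeq : j = 2*b+1 := by omega
        rw [hjeq, aN_odd] at haj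
        omega
    · have hieq : i = 2*a+1 := by omega
      rw [hieq, lbN_odd]; omega

-- climbing from i to i + lbN i cannot make the cleared form land in [i, i + lbN i)
theorem step_keep (j : Nat) : ∀ i : Nat, 0 < i → i + lbN i ≤ j → aN j < i + lbN i → aN j < i := by
  induction j using Nat.strong_induction_on with
  | _ j ih =>
    intro i hi hij haj
    rcases Nat.even_or_odd i with ⟨a, ha⟩ | ⟨a, ha⟩
    · have hieq : i = 2*a := by omega
      have ha0 : 0 < a := by omega
      have hlb : lbN i = 2 * lbN a := by rw [hieq]; exact lbN_even a ha0
      rcases Nat.even_or_odd j with ⟨b, hb⟩ | ⟨b, hb⟩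
      · have hjeq : j = 2*b := by omega
        have hb0 : 0 < b := by omega
        have haNj : aN j = 2 * aN b := by rw [hjeq]; exact aN_even b hb0
        have := ih b (by omega) a ha0 (by omega) (by omega)
        omega
      · have hjeq : j = 2*b+1 := by omega
        have haNj : aN j = 2*b := by rw [hjeq]; exact aN_odd b
        have hlba : 0 < lbN a := lbN_pos a ha0
        omega
    · have hieq : i = 2*a+1 := by omega
      have hlb : lbN i = 1 := by rw [hieq]; exact lbN_odd a
      rcases Nat.even_or_odd j with ⟨b, hb⟩ | ⟨b, hb⟩
      · have hjeq : j = 2*b := by omega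
        have hb0 : 0 < b := by omega
        have haNj : aN j = 2 * aN b := by rw [hjeq]; exact aN_even b hb0
        omega
      · have hjeq : j = 2*b+1 := by omega
        have haNj : aN j = 2*b := by rw [hjeq]; exact aN_odd b
        omega

-- what Python's `idx & -idx` computes, for a Nat-valued idx
theorem band_self_neg (n : Nat) : PySem.Int.band (n:Int) (-(n:Int)) = (lbN n : Int) := by
  rcases Nat.eq_zero_or_pos n with rfl | h
  · simp [PySem.Int.band, aN, lbN]
  · show PySem.Int.band (n:Int) (-(n:Int)) = ((n - aN n : Nat) : Int)
    simp only [PySem.Int.band, aN]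
    split_ifs with h1 h2
    · omega
    · have e1 : ((n:Int)).toNat = n := by omega
      have e2 : (-(-(n:Int)) - 1).toNat = n - 1 := by omega
      rw [e1, e2]
    · omega
    · omega

-- running max of the recorded lengths whose rank lies in (lo, hi]
def bmax (r : Int → Nat) (best : List (Int × Int)) (lo hi : Nat) : Int :=
  best.foldl (fun m e => if lo < r e.1 ∧ r e.1 ≤ hi then max m e.2 else m) 0

theorem foldl_if_max_ge_init (P : Int × Int → Prop) [DecidablePred P] :
    ∀ (best : List (Int × Int)) (init : Int),
      init ≤ best.foldl (fun m e => if P e then max m e.2 else m) init := by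
  intro best
  induction best with
  | nil => intro init; simp
  | cons e rest ih =>
      intro init
      simp only [List.foldl_cons]
      refine le_trans ?_ (ih _)
      split_ifs with h
      · exact le_max_left _ _
      · exact le_refl _

theorem bmax_nonneg (r : Int → Nat) (best : List (Int × Int)) (lo hi : Nat) :
    0 ≤ bmax r best lo hi :=
  foldl_if_max_ge_init _ best 0

theorem bmax_empty_range (r : Int → Nat) (best : List (Int × Int)) (lo hi : Nat)
    (h : hi ≤ lo) : bmax r best lo hi = 0 := by
  unfold bmax
  induction best with
  | nil => rfl
  | cons e rest ih =>
      simp only [List.foldl_cons]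
      rw [if_neg (by omega)]
      exact ih

theorem bmax_split_aux (r : Int → Nat) (lo mid hi : Nat) (h1 : lo ≤ mid) (h2 : mid ≤ hi) :
    ∀ (best : List (Int × Int)) (u v : Int),
      best.foldl (fun m e => if lo < r e.1 ∧ r e.1 ≤ hi then max m e.2 else m) (max u v) =
        max (best.foldl (fun m e => if lo < r e.1 ∧ r e.1 ≤ mid then max m e.2 else m) u)
            (best.foldl (fun m e => if mid < r e.1 ∧ r e.1 ≤ hi then max m e.2 else m) v) := by
  intro best
  induction best with
  | nil => intro u v; rfl
  | cons e rest ih =>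
      intro u v
      simp only [List.foldl_cons]
      have step : (if lo < r e.1 ∧ r e.1 ≤ hi then max (max u v) e.2 else max u v) =
          max (if lo < r e.1 ∧ r e.1 ≤ mid then max u e.2 else u)
              (if mid < r e.1 ∧ r e.1 ≤ hi then max v e.2 else v) := by
        split_ifs <;> omega
      rw [step, ih]

theorem bmax_split (r : Int → Nat) (best : List (Int × Int)) (lo mid hi : Nat)
    (h1 : lo ≤ mid) (h2 : mid ≤ hi) :
    bmax r best lo hi = max (bmax r best lo mid) (bmax r best mid hi) := by
  have := bmax_split_aux r lo mid hi h1 h2 best 0 0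
  simpa [bmax] using this

theorem bmax_append (r : Int → Nat) (best : List (Int × Int)) (e : Int × Int) (lo hi : Nat) :
    bmax r (best ++ [e]) lo hi =
      if lo < r e.1 ∧ r e.1 ≤ hi then max (bmax r best lo hi) e.2 else bmax r best lo hi := by
  unfold bmax
  rw [List.foldl_append]
  rfl

theorem fenUpdate_length (fuel : Nat) : ∀ (tree : List Int) (idx val : Int),
    (fenUpdate tree idx val fuel).length = tree.length := by
  induction fuel with
  | zero => intro tree idx val; rfl
  | succ fuel ih =>
      intro tree idx val
      unfold fenUpdate
      split_ifs with h
      · rw [ih, PySem.List.length_pySetD]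
      · rfl

theorem getD_set_eq (l : List Int) (i : Nat) (v d : Int) (j : Nat) :
    (l.set i v).getD j d = if j = i ∧ i < l.length then v else l.getD j d := by
  simp only [List.getD_eq_getElem?_getD, List.getElem?_set]
  split_ifs with h1 h2 h3 <;> simp_all

-- the update loop raises exactly the entries j ∈ [i, len) with aN j < i to at least v
theorem fenUpdate_getD (fuel : Nat) : ∀ (tree : List Int) (i : Nat) (v : Int), 0 < i →
    tree.length ≤ fuel + i → ∀ j : Nat,
    (fenUpdate tree (i:Int) v fuel).getD j 0 =
      if i ≤ j ∧ aN j < i ∧ j < tree.length then max (tree.getD j 0) v else tree.getD j 0 := by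
  induction fuel with
  | zero =>
      intro tree i v hi hlen j
      rw [if_neg (by omega)]
      rfl
  | succ fuel ih =>
      intro tree i v hi hlen j
      unfold fenUpdate
      by_cases hlt : i < tree.length
      · rw [if_pos (by exact_mod_cast hlt)]
        have hband : (i:Int) + PySem.Int.band (i:Int) (-(i:Int)) = ((i + lbN i : Nat) : Int) := by
          rw [band_self_neg]; push_cast; ring
        have hset : PySem.List.pySetD tree (i:Int) (max (PySem.List.pyGetD tree (i:Int) 0) v)
            = tree.set i (max (tree.getD i 0) v) := by
          simp [PySem.List.pySetD_natCast, PySem.List.pyGetD_natCast]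
        rw [hband, hset]
        have hlb := lbN_pos i hi
        have hlen1 : (tree.set i (max (tree.getD i 0) v)).length ≤ fuel + (i + lbN i) := by
          simp; omega
        rw [ih _ (i + lbN i) v (by omega) hlen1 j]
        rw [getD_set_eq]
        simp only [List.length_set]
        by_cases hji : j = i
        · have hC2 : j = i ∧ i < tree.length := ⟨hji, hlt⟩
          rw [if_pos hC2]
          subst hji
          rw [if_neg (show ¬(j + lbN j ≤ j ∧ aN j < j + lbN j ∧ j < tree.length) by
            rintro ⟨h1, _, _⟩; omega)]
          rw [if_pos ⟨le_refl j, aN_lt j hi, hlt⟩]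
        · have hC2 : ¬(j = i ∧ i < tree.length) := by rintro ⟨h, _⟩; exact hji h
          rw [if_neg hC2]
          by_cases hcond : i ≤ j ∧ aN j < i ∧ j < tree.length
          · obtain ⟨h1, h2, h3⟩ := hcond
            have hge : i + lbN i ≤ j := step_ge j i hi (by omega) h2
            rw [if_pos ⟨hge, by omega, h3⟩, if_pos ⟨h1, h2, h3⟩]
          · rw [if_neg hcond]
            rw [if_neg (by
              rintro ⟨h1, h2, h3⟩
              exact hcond ⟨by omega, step_keep j i hi h1 h2, h3⟩)]
      · rw [if_neg (by exact_mod_cast hlt)]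
        rw [if_neg (by omega)]

-- the query loop reads off the maximum of all recorded lengths of rank ≤ q
theorem fenQuery_spec (r : Int → Nat) (best : List (Int × Int)) (tree : List Int)
    (hInv : ∀ j : Nat, 0 < j → j < tree.length → tree.getD j 0 = bmax r best (aN j) j) :
    ∀ (q : Nat) (fuel : Nat) (res : Int), q ≤ fuel → q < tree.length → 0 ≤ res →
      fenQuery tree (q:Int) res fuel = max res (bmax r best 0 q) := by
  intro q
  induction q using Nat.strong_induction_on with
  | _ q ih =>
    intro fuel res hfuel hq hres
    rcases Nat.eq_zero_or_pos q with rfl | hq0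
    · cases fuel with
      | zero =>
          show res = _
          rw [bmax_empty_range r best 0 0 (le_refl 0)]; omega
      | succ fuel =>
          unfold fenQuery
          rw [if_neg (by omega)]
          rw [bmax_empty_range r best 0 0 (le_refl 0)]
          omega
    · cases fuel with
      | zero => omega
      | succ fuel =>
          unfold fenQuery
          rw [if_pos (by exact_mod_cast hq0)]
          have hband : (q:Int) - PySem.Int.band (q:Int) (-(q:Int)) = ((aN q : Nat) : Int) := by
            rw [band_self_neg]
            have h1 : lbN q ≤ q := by unfold lbN; omega
            have h2 : aN q = q - lbN q := by unfold lbN; have := aN_le q; omega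
            push_cast [h2]
            omega
          rw [hband]
          have hget : PySem.List.pyGetD tree (q:Int) 0 = tree.getD q 0 := by
            simp [PySem.List.pyGetD_natCast]
          rw [hget, hInv q hq0 hq]
          have haN := aN_lt q hq0
          rw [ih (aN q) haN fuel (max res (bmax r best (aN q) q)) (by omega) (by omega)
            (le_trans hres (le_max_left _ _))]
          rw [bmax_split r best 0 (aN q) q (by omega) (by omega)]
          omega

-- in a strictly increasing list, position order is value order
theorem idxOf_lt_iff (S : List Int) (hchain : S.Pairwise (· < ·)) {a b : Int}
    (ha : a ∈ S) (hb : b ∈ S) : a < b ↔ S.idxOf a < S.idxOf b := by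
  have hia := List.idxOf_lt_length_of_mem ha
  have hib := List.idxOf_lt_length_of_mem hb
  have hga : S[S.idxOf a] = a := List.getElem_idxOf hia
  have hgb : S[S.idxOf b] = b := List.getElem_idxOf hib
  rw [List.pairwise_iff_getElem] at hchain
  constructor
  · intro hab
    rcases lt_trichotomy (S.idxOf a) (S.idxOf b) with h | h | h
    · exact h
    · exfalso
      have hga' : S[S.idxOf a]? = some a := by rw [List.getElem?_eq_getElem hia, hga]
      have hgb' : S[S.idxOf b]? = some b := by rw [List.getElem?_eq_getElem hib, hgb]
      rw [h, hgb'] at hga'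
      have : a = b := by exact (Option.some.injEq _ _ ▸ hga').symm
      subst this; exact lt_irrefl _ hab
    · exfalso; have := hchain _ _ hib hia h; rw [hga, hgb] at this; omega
  · intro h; have := hchain _ _ hia hib h; rw [hga, hgb] at this; exact this

theorem mem_enumerate_of_getElem {α : Type} : ∀ (S : List α) (s : Int) (i : Nat)
    (h : i < S.length), ((s + (i:Int), S[i]) ∈ PySem.List.enumerate S s) := by
  intro S
  induction S with
  | nil => intro s i h; simp at h
  | cons x t ih =>
      intro s i h
      cases i with
      | zero => simp [PySem.List.enumerate]
      | succ i =>
          have := ih (s+1) i (by simpa using h)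
          have ht : i < t.length := by simpa using h
          simp only [PySem.List.enumerate, List.mem_cons]
          right
          have e : ((s + ((i:Nat)+1 : Nat) : Int), (x :: t)[i + 1]'h) =
              ((s + 1 + (i:Int) : Int), t[i]'ht) := by
            simp only [Prod.mk.injEq]
            constructor
            · push_cast; ring
            · rfl
          rw [e]
          exact this

-- the enumerate-fold dictionary maps each y of S to its 1-based rank
theorem yIdx_getD (S : List Int) (hnd : S.Nodup) (y : Int) (hy : y ∈ S) :
    ((PySem.List.enumerate S).foldl (fun d e => d.insert e.2 (e.1 + 1))
        (PySem.Dict.empty : PySem.Dict Int Int)).getD y 0 = (S.idxOf y : Int) + 1 := by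
  have hfresh : ∀ a ∈ PySem.List.enumerate S,
      (PySem.Dict.empty : PySem.Dict Int Int).contains a.2 = false := by
    intro a _; simp [PySem.Dict.contains_empty]
  have hndk : ((PySem.List.enumerate S).map (fun e => e.2)).Nodup := by
    rw [PySem.List.map_snd_enumerate]; exact hnd
  have hitems := PySem.Dict.items_foldl_insert_fresh (PySem.List.enumerate S)
    (fun e => e.2) (fun e => e.1 + 1) PySem.Dict.empty hfresh hndk
  have hkeysnd := PySem.Dict.nodup_keys_foldl_insert_key (PySem.List.enumerate S)
    (fun e => e.2) (fun _ e => e.1 + 1) (PySem.Dict.empty : PySem.Dict Int Int)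
    PySem.Dict.nodup_keys_empty
  have hiy : S.idxOf y < S.length := List.idxOf_lt_length_of_mem hy
  have hmem0 := mem_enumerate_of_getElem S 0 (S.idxOf y) hiy
  have hmem : (((S.idxOf y : Nat) : Int), y) ∈ PySem.List.enumerate S 0 := by
    have hg : S[S.idxOf y] = y := List.getElem_idxOf hiy
    simpa [hg] using hmem0
  have hmemItems : (y, (S.idxOf y : Int) + 1) ∈
      ((PySem.List.enumerate S).foldl (fun d e => d.insert e.2 (e.1 + 1))
        (PySem.Dict.empty : PySem.Dict Int Int)).items := by
    rw [hitems, show (PySem.Dict.empty : PySem.Dict Int Int).items = [] from rfl,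
      List.nil_append]
    exact List.mem_map.mpr ⟨((S.idxOf y : Int), y), hmem, rfl⟩
  exact PySem.Dict.getD_of_mem_items _ hmemItems hkeysnd 0

theorem getD_replicate_zero (n j : Nat) : (List.replicate n (0:Int)).getD j 0 = 0 := by
  simp only [List.getD_eq_getElem?_getD, List.getElem?_replicate]
  split_ifs <;> rfl

-- the scan loops of A and B agree step for step: A's Fenwick query of ranks < rank y
-- is B's direct maximum over earlier points with smaller y
theorem go_eq (S : List Int) (yIdx : PySem.Dict Int Int) (tx ty : Int)
    (hchain : List.Pairwise (· < ·) S)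
    (hDict : ∀ y ∈ S, yIdx.getD y 0 = (S.idxOf y : Int) + 1) :
    ∀ (points : List (List Int)) (tree : List Int) (best : List (Int × Int)),
      (∀ p ∈ points, PySem.List.pyGetD p 1 0 ∈ S) →
      tree.length = S.length + 2 →
      (∀ e ∈ best, e.1 ∈ S) →
      (∀ j : Nat, 0 < j → j < tree.length →
        tree.getD j 0 = bmax (fun y => S.idxOf y + 1) best (aN j) j) →
      getLenGoA yIdx tx ty points tree = getLenGoB tx ty points best := by
  intro points
  induction points with
  | nil => intro tree best _ _ _ _; rfl
  | cons p rest ih =>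
      intro tree best hpts hlen hbestY hInv
      have hy : PySem.List.pyGetD p 1 0 ∈ S := hpts p (List.mem_cons_self)
      set y := PySem.List.pyGetD p 1 0 with hydef
      have hiy : S.idxOf y < S.length := List.idxOf_lt_length_of_mem hy
      have hidx : yIdx.getD y 0 = (S.idxOf y : Int) + 1 := hDict y hy
      have hcur : fenQuery tree (yIdx.getD y 0 - 1) 0 tree.length + 1 =
          1 + best.foldl (fun m e => if e.1 < y then max m e.2 else m) 0 := by
        have e1 : yIdx.getD y 0 - 1 = ((S.idxOf y : Nat) : Int) := by rw [hidx]; ring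
        rw [e1, fenQuery_spec (fun y => S.idxOf y + 1) best tree hInv (S.idxOf y) tree.length 0
          (by omega) (by omega) (le_refl 0)]
        rw [max_eq_right (bmax_nonneg _ _ _ _)]
        have hfold : bmax (fun y => S.idxOf y + 1) best 0 (S.idxOf y) =
            best.foldl (fun m e => if e.1 < y then max m e.2 else m) 0 := by
          apply PySem.List.foldl_congr_mem
          intro acc e he
          have he1 : e.1 ∈ S := hbestY e he
          have : e.1 < y ↔ (0 < S.idxOf e.1 + 1 ∧ S.idxOf e.1 + 1 ≤ S.idxOf y) := by
            rw [idxOf_lt_iff S hchain he1 hy]; omega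
          by_cases hc : e.1 < y
          · rw [if_pos hc, if_pos (this.mp hc)]
          · rw [if_neg hc, if_neg (fun hcc => hc (this.mpr hcc))]
        rw [hfold]; ring
      show (if PySem.List.pyGetD p 0 0 = tx ∧ y = ty then
          fenQuery tree (yIdx.getD y 0 - 1) 0 tree.length + 1
        else getLenGoA yIdx tx ty rest
          (fenUpdate tree (yIdx.getD y 0)
            (fenQuery tree (yIdx.getD y 0 - 1) 0 tree.length + 1) tree.length)) =
        (if PySem.List.pyGetD p 0 0 = tx ∧ y = ty then
          1 + best.foldl (fun m e => if e.1 < y then max m e.2 else m) 0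
        else getLenGoB tx ty rest
          (best ++ [(y, 1 + best.foldl (fun m e => if e.1 < y then max m e.2 else m) 0)]))
      split_ifs with hcond
      · exact hcur
      · set cur := fenQuery tree (yIdx.getD y 0 - 1) 0 tree.length + 1 with hcurdef
        rw [← hcur]
        apply ih
        · intro q hq; exact hpts q (List.mem_cons_of_mem p hq)
        · rw [fenUpdate_length]; exact hlen
        · intro e he
          rcases List.mem_append.mp he with h | h
          · exact hbestY e h
          · simp only [List.mem_singleton] at h
            rw [h]
            exact hy
        · intro j hj hjlen
          rw [fenUpdate_length] at hjlen
          have hidx' : yIdx.getD y 0 = ((S.idxOf y + 1 : Nat) : Int) := by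
            rw [hidx]; push_cast; ring
          rw [hidx', fenUpdate_getD tree.length tree (S.idxOf y + 1) cur (by omega) (by omega) j]
          rw [bmax_append]
          by_cases hc1 : S.idxOf y + 1 ≤ j ∧ aN j < S.idxOf y + 1 ∧ j < tree.length
          · rw [if_pos hc1, if_pos ⟨hc1.2.1, hc1.1⟩, hInv j hj hjlen]
          · rw [if_neg hc1, if_neg (by rintro ⟨h1, h2⟩; exact hc1 ⟨h2, h1, hjlen⟩),
              hInv j hj hjlen]

theorem getLen_eq (points : List (List Int)) (tx ty : Int) :
    getLenA points tx ty = getLenB points tx ty := by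
  unfold getLenA getLenB
  set ys := points.map (fun p => PySem.List.pyGetD p 1 0) with hys
  set S := PySem.List.sorted (PySem.Set.ofList ys) (fun y => y) with hS
  have hperm : S.Perm (PySem.Set.ofList ys) := PySem.List.sorted_perm _ _ _
  have hnd : S.Nodup := (hperm.symm).nodup (PySem.Set.nodup_ofList ys)
  have hle : S.Pairwise (fun a b => a ≤ b) := PySem.List.sorted_pairwise _ _
  have hchain : S.Pairwise (· < ·) := by
    have := hle.and hnd
    exact this.imp (fun h => lt_of_le_of_ne h.1 h.2)
  apply go_eq S _ tx ty hchain
  · intro y hy; exact yIdx_getD S hnd y hy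
  · intro p hp
    have : PySem.List.pyGetD p 1 0 ∈ ys := List.mem_map_of_mem hp
    have : PySem.List.pyGetD p 1 0 ∈ PySem.Set.ofList ys := by
      rw [PySem.Set.mem_ofList]; exact this
    exact hperm.mem_iff.mpr this
  · simp only [List.length_replicate]
    rw [hS]
  · intro e he; exact absurd he (List.not_mem_nil)
  · intro j hj hjlen
    rw [getD_replicate_zero]
    rfl

-- ===== VERDICT (by name: the statement is the Claim_ definition above) =====
theorem maxPathLength_spec : Claim_equal_maxPathLength := by
  intro nums k _ _
  unfold Spec_maxPathLength maxPathLength maxPathLength_alt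
  cases PySem.List.pyGet? nums k with
  | none => rfl
  | some pk => simp only [getLen_eq]
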